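-- pv_equiv track=rewrite | github.com/LineG/ADA_472 | next_moves.py | white_at
-- ===== SOURCE A (Python) =====
-- def white_at(b,r,N):
--     count  = 0
--     for i in range(N):
--         if (b[i] == 0 ):
--             count = count+1
--             if (count == r):
--                 return i
--     return N+1
-- ===== SOURCE B (Python) =====
-- def white_at(b, r, N):
--     zeros = [i for i in range(N) if b[i] == 0]
--     if 1 <= r <= len(zeros):
--         return zeros[r - 1]
--     return N + 1
-- ===== Notes on version B (the rewrite author's own statement) =====
-- stated objective: alternative
-- what changed: A's counting scan with early return is replaced by a materialize-then-select decomposition: build the list of all zero positions, then pick the (r-1)-th by rank, with N+1 when the rank is out of range.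
import Mathlib
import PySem

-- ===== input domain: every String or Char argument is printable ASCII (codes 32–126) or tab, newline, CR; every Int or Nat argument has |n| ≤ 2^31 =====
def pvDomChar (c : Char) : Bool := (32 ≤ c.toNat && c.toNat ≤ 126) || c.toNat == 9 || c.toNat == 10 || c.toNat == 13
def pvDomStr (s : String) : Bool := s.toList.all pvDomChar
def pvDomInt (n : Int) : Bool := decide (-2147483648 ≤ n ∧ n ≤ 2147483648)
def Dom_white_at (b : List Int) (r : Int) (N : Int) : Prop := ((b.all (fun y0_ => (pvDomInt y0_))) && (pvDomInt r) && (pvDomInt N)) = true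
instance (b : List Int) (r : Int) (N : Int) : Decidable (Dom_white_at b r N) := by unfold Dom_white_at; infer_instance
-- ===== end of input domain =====

-- B replaces A's counting scan (early return at the r-th zero) by a materialize-then-select
-- decomposition: collect all zero positions, then index by rank; alternative structure, same cost.


-- ===== PORT A =====
-- A's loop over range(N), counting zeros and returning early at the r-th zero.
-- b[i] is ported as pyGetD (Pre_ guarantees every touched index is in range).
def white_at_loopA (b : List Int) (r : Int) (N : Int) : List Int → Int → Int
  | [], _ => N + 1
  | i :: rest, count =>
      if PySem.List.pyGetD b i 0 = 0 then
        if count + 1 = r then i else white_at_loopA b r N rest (count + 1)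
      else white_at_loopA b r N rest count

def white_at (b : List Int) (r : Int) (N : Int) : Int :=
  white_at_loopA b r N (PySem.List.pyRange 0 N 1) 0

-- ===== PORT B =====
def white_at_alt (b : List Int) (r : Int) (N : Int) : Int :=
  let zeros := (PySem.List.pyRange 0 N 1).filter (fun i => PySem.List.pyGetD b i 0 = 0)
  if 1 ≤ r ∧ r ≤ (zeros.length : Int) then
    (PySem.List.pyGet? zeros (r - 1)).getD (N + 1)
  else N + 1

-- ===== PRECONDITION & SPEC =====
-- A raises IndexError when N > len(b) (b[i] for some i in range(N)); nothing else raises.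
def Pre_white_at (b : List Int) (r : Int) (N : Int) : Prop := N ≤ (b.length : Int)
instance (b : List Int) (r : Int) (N : Int) : Decidable (Pre_white_at b r N) := by unfold Pre_white_at; infer_instance
def pvWitness_white_at : List Int × Int × Int := ([1, 0, 0, 3], 2, 4)
def Spec_white_at (b : List Int) (r : Int) (N : Int) (out : Int) : Prop := out = white_at_alt b r N
instance (b : List Int) (r : Int) (N : Int) (out : Int) : Decidable (Spec_white_at b r N out) := by unfold Spec_white_at; infer_instance

-- ===== CLAIM (what is proved, stated in full; the proofs are below) =====
def Claim_equal_white_at : Prop := ∀ (b : List Int) (r : Int) (N : Int), Dom_white_at b r N → Pre_white_at b r N → Spec_white_at b r N (white_at b r N)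

-- ===== LEMMAS AND PROOFS =====

-- A's scan with count c equals rank-selection at rank r - c in the filtered list.
theorem white_at_loopA_eq (b : List Int) (r : Int) (N : Int) :
    ∀ (l : List Int) (c : Int),
      white_at_loopA b r N l c =
        (let zs := l.filter (fun i => PySem.List.pyGetD b i 0 = 0)
         if 1 ≤ r - c ∧ r - c ≤ (zs.length : Int) then
           (PySem.List.pyGet? zs (r - c - 1)).getD (N + 1)
         else N + 1) := by
  intro l
  induction l with
  | nil =>
      intro c
      simp [white_at_loopA]
      omega
  | cons i rest ih =>
      intro c
      by_cases hz : PySem.List.pyGetD b i 0 = 0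
      · by_cases hr : c + 1 = r
        · have hrc : r - c = 1 := by omega
          simp [white_at_loopA, hz, hr, hrc]
        · have h2 : white_at_loopA b r N (i :: rest) c = white_at_loopA b r N rest (c + 1) := by
            simp [white_at_loopA, hz, hr]
          rw [h2, ih (c + 1)]
          simp only [List.filter_cons, hz, decide_true, if_true]
          set zs' := rest.filter (fun i => PySem.List.pyGetD b i 0 = 0) with hzs
          by_cases hcond : 1 ≤ r - (c + 1) ∧ r - (c + 1) ≤ (zs'.length : Int)
          · have hcond' : 1 ≤ r - c ∧ r - c ≤ ((i :: zs').length : Int) := by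
              simp only [List.length_cons]; push_cast; omega
            simp only [hcond, hcond']
            have hk : ∃ k : Nat, r - c - 1 = (k : Int) + 1 := by
              refine ⟨(r - c - 2).toNat, ?_⟩; omega
            obtain ⟨k, hk⟩ := hk
            rw [hk, PySem.List.pyGet?_cons_succ]
            have : r - (c + 1) - 1 = (k : Int) := by omega
            rw [this]
          · have hcond' : ¬ (1 ≤ r - c ∧ r - c ≤ ((i :: zs').length : Int)) := by
              simp only [List.length_cons]; push_cast
              intro h
              exact hcond ⟨by omega, by
                have hne : r - c ≠ 1 := by omega
                omega⟩
            simp only [hcond, hcond', if_false]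
      · have h2 : white_at_loopA b r N (i :: rest) c = white_at_loopA b r N rest c := by
          simp [white_at_loopA, hz]
        rw [h2, ih c]
        simp only [List.filter_cons, hz, decide_false, if_false, Bool.false_eq_true]

-- ===== VERDICT (by name: the statement is the Claim_ definition above) =====
theorem white_at_spec : Claim_equal_white_at := by
  intro b r N _ _
  unfold Spec_white_at white_at white_at_alt
  rw [white_at_loopA_eq]
  simp only [sub_zero]
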